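-- pv_equiv track=rewrite | github.com/seyi103/programmers | report.py | solution
-- ===== SOURCE A (Python) =====
-- from collections import defaultdict
--
-- def solution(id_list, report, k):
--     answer = []
--
--     #중복 제거
--     report = list(set(report))
--     #각 사용자마다 신고한 아이디 저장
--     user = defaultdict(set)
--     #사용자마다 신고당한 횟수 저장
--     count = defaultdict(int)
--
--     for i in report:
--         #report의 첫 원소는 이용자id, 두번쨰는 신고한 id
--         uid, rid = i.split()
--         # 신고자가 신고한 id 추가
--         user[uid].add(rid)
--         # 신고당한 id의 신고 횟수 추가
--         count[rid] += 1
--     for i in id_list: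
--         result = 0
--         # user가 신고한 id가 k번 이상 신고 당했으면, 받을 메일 추가
--         for u in user[i]:
--             if count[u]>=k:
--                 result +=1
--         answer.append(result)
--     return answer
-- ===== SOURCE B (Python) =====
-- from collections import defaultdict
--
-- def solution(id_list, report, k):
--     # one tally pass over deduped reports; no per-user sets
--     dedup = set(report)
--     count = defaultdict(int)
--     pairs = set()
--     for r in dedup:
--         uid, rid = r.split()
--         count[rid] += 1
--         pairs.add((uid, rid))
--     banned = {rid for rid, c in count.items() if c >= k}
--     result = defaultdict(int)
--     for uid, rid in pairs:
--         if rid in banned: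
--             result[uid] += 1
--     return [result.get(i, 0) for i in id_list]
-- ===== Notes on version B (the rewrite author's own statement) =====
-- stated objective: alternative
-- what changed: B never builds per-user sets of reported ids: it tallies a banned set once and then makes one pass over the deduped (reporter, reported) pairs, incrementing the reporter's counter, instead of A's scan of each id_list user's reported-id set.
import Mathlib
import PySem

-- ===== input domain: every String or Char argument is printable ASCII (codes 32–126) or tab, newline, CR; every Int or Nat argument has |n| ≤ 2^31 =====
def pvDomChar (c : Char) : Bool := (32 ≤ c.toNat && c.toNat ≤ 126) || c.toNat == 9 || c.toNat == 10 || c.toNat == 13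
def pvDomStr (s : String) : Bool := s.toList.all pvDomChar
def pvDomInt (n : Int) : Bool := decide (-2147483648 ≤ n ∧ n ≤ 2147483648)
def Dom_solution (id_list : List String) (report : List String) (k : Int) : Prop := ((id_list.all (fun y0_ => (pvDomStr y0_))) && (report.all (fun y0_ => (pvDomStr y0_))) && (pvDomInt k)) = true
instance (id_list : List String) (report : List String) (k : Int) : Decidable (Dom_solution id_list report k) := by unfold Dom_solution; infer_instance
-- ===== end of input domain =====

-- B replaces A's per-user sets (and the scan of each id_list user's set) by one tally pass
-- over the deduped (reporter, reported) pairs against a precomputed banned set (objective: alternative).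

-- ===== PORT A =====
-- loop body of A's first 'for i in report:' (uid, rid = i.split(); user[uid].add(rid); count[rid] += 1)
def pvStepA (st : PySem.Dict String (PySem.Set String) × PySem.Dict String Int) (i : String) :
    PySem.Dict String (PySem.Set String) × PySem.Dict String Int :=
  match PySem.Str.split₀ i with
  | [uid, rid] =>
      (st.1.insert uid (PySem.Set.add (st.1.getD uid PySem.Set.empty) rid),
       st.2.insert rid (st.2.getD rid 0 + 1))
  | _ => st  -- unreachable under Pre_solution (Python raises ValueError there)

def solution (id_list : List String) (report : List String) (k : Int) : List Int :=
  let report' := PySem.Set.ofList report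
  let st := report'.foldl pvStepA (PySem.Dict.empty, PySem.Dict.empty)
  id_list.foldl (fun answer i =>
    answer ++ [((st.1.getD i PySem.Set.empty).foldl
        (fun result u => if st.2.getD u 0 ≥ k then result + 1 else result) 0)]) []

-- ===== PORT B =====
-- loop body of B's 'for r in dedup:' (uid, rid = r.split(); count[rid] += 1; pairs.add((uid, rid)))
def pvStepB (st : PySem.Dict String Int × PySem.Set (String × String)) (r : String) :
    PySem.Dict String Int × PySem.Set (String × String) :=
  match PySem.Str.split₀ r with
  | [uid, rid] =>
      (st.1.insert rid (st.1.getD rid 0 + 1), PySem.Set.add st.2 (uid, rid))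
  | _ => st  -- unreachable under Pre_solution (Python raises ValueError there)

def solution_alt (id_list : List String) (report : List String) (k : Int) : List Int :=
  let dedup := PySem.Set.ofList report
  let st := dedup.foldl pvStepB (PySem.Dict.empty, PySem.Set.empty)
  let banned : PySem.Set String :=
    PySem.Set.ofList ((st.1.items.filter (fun p => p.2 ≥ k)).map (·.1))
  let result := st.2.foldl
    (fun (d : PySem.Dict String Int) p =>
      if PySem.Set.contains banned p.2 then d.insert p.1 (d.getD p.1 0 + 1) else d)
    PySem.Dict.empty
  id_list.map (fun i => result.getD i 0)

-- ===== PRECONDITION & SPEC =====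
-- Pre_ excludes exactly the report entries that do not split into two whitespace-separated
-- tokens: there Python's 'uid, rid = i.split()' raises ValueError.
def Pre_solution (id_list : List String) (report : List String) (k : Int) : Prop :=
  ∀ r ∈ report, (PySem.Str.split₀ r).length = 2
instance (id_list : List String) (report : List String) (k : Int) : Decidable (Pre_solution id_list report k) := by unfold Pre_solution; infer_instance
def pvWitness_solution : List String × List String × Int := (["a", "b"], ["a b", "b a", "a b"], 1)

def Spec_solution (id_list : List String) (report : List String) (k : Int) (out : List Int) : Prop := out = solution_alt id_list report k
instance (id_list : List String) (report : List String) (k : Int) (out : List Int) : Decidable (Spec_solution id_list report k out) := by unfold Spec_solution; infer_instance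

-- ===== CLAIM (what is proved, stated in full; the proofs are below) =====
def Claim_equal_solution : Prop := ∀ (id_list : List String) (report : List String) (k : Int), Dom_solution id_list report k → Pre_solution id_list report k → Spec_solution id_list report k (solution id_list report k)

-- ===== LEMMAS AND PROOFS =====

-- first and second token of r.split() (defined when the split has length 2)
def pvU (r : String) : String := (PySem.Str.split₀ r).getD 0 ""
def pvR (r : String) : String := (PySem.Str.split₀ r).getD 1 ""

lemma pvSp_eq (r : String) (h : (PySem.Str.split₀ r).length = 2) :
    PySem.Str.split₀ r = [pvU r, pvR r] := by
  rcases hs : PySem.Str.split₀ r with _ | ⟨a, _ | ⟨b, _ | _⟩⟩ <;>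
    simp [hs] at h ⊢ <;> simp [pvU, pvR, hs]

lemma pvStepA_eq (st : PySem.Dict String (PySem.Set String) × PySem.Dict String Int)
    (r : String) (h : (PySem.Str.split₀ r).length = 2) :
    pvStepA st r
    = (st.1.insert (pvU r) (PySem.Set.add (st.1.getD (pvU r) PySem.Set.empty) (pvR r)),
       st.2.insert (pvR r) (st.2.getD (pvR r) 0 + 1)) := by
  rw [pvStepA, pvSp_eq r h]

lemma pvStepB_eq (st : PySem.Dict String Int × PySem.Set (String × String))
    (r : String) (h : (PySem.Str.split₀ r).length = 2) :
    pvStepB st r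
    = (st.1.insert (pvR r) (st.1.getD (pvR r) 0 + 1), PySem.Set.add st.2 (pvU r, pvR r)) := by
  rw [pvStepB, pvSp_eq r h]

lemma pvOfList_eq {α : Type} [BEq α] (xs : List α) :
    List.foldl PySem.Set.add PySem.Set.empty xs = PySem.Set.ofList xs :=
  (PySem.Set.ofList_eq_foldl xs).symm

lemma pvOfList_append_singleton {α : Type} [BEq α] (xs : List α) (x : α) :
    PySem.Set.ofList (xs ++ [x]) = PySem.Set.add (PySem.Set.ofList xs) x := by
  simp [PySem.Set.ofList_eq_foldl]

lemma pvGetD_foldl_set {β : Type} (key : β → String) (val : β → String)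
    (l : List β) (d : PySem.Dict String (PySem.Set String)) (i : String) :
    (l.foldl (fun d r => d.insert (key r) (PySem.Set.add (d.getD (key r) PySem.Set.empty) (val r))) d).getD i PySem.Set.empty
    = (l.filter (fun r => key r == i)).foldl (fun s r => PySem.Set.add s (val r)) (d.getD i PySem.Set.empty) := by
  induction l generalizing d with
  | nil => rfl
  | cons x t ih =>
    simp only [List.foldl_cons, List.filter_cons]
    rw [ih]
    by_cases h : key x = i
    · simp [h]
    · simp [h, PySem.Dict.getD_insert, Ne.symm h]

lemma pvGetD_foldl_tally {β : Type} (c : β → Bool) (fst' : β → String)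
    (l : List β) (d : PySem.Dict String Int) (i : String) :
    (l.foldl (fun d p => if c p then d.insert (fst' p) (d.getD (fst' p) 0 + 1) else d) d).getD i 0
    = d.getD i 0 + ((l.filter (fun p => c p && fst' p == i)).length : Int) := by
  induction l generalizing d with
  | nil => simp
  | cons x t ih =>
    simp only [List.foldl_cons, List.filter_cons]
    by_cases hc : c x
    · by_cases h : fst' x = i
      · simp [hc, h, ih]; ring
      · simp [hc, h, ih, PySem.Dict.getD_insert, Ne.symm h]
    · simp [hc, ih]

lemma pvAdd_of_mem {α : Type} [BEq α] [LawfulBEq α] (s : PySem.Set α) (x : α) (h : x ∈ s) :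
    PySem.Set.add s x = s := by
  show (if s.contains x then s else s ++ [x]) = s
  rw [if_pos ((PySem.Set.contains_iff s x).2 h)]

lemma pvAdd_of_not_mem {α : Type} [BEq α] [LawfulBEq α] (s : PySem.Set α) (x : α) (h : ¬ x ∈ s) :
    PySem.Set.add s x = s ++ [x] := by
  show (if s.contains x then s else s ++ [x]) = s ++ [x]
  rw [if_neg (fun hc => h ((PySem.Set.contains_iff s x).1 hc))]

-- deduped pairs filtered to reporter i, measured by q on the reported id, equal the
-- deduped reported-ids of i's entries measured by q
lemma pvCore {β : Type} (key val : β → String) (q : String → Bool) (i : String) (l : List β) :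
    ((PySem.Set.ofList (l.map (fun r => (key r, val r)))).filter (fun p => q p.2 && p.1 == i)).length
    = (PySem.Set.ofList ((l.filter (fun r => key r == i)).map val)).countP q := by
  induction l using List.reverseRecOn with
  | nil => rfl
  | append_singleton t x ih =>
    simp only [List.map_append, List.map_cons, List.map_nil, List.filter_append]
    rw [pvOfList_append_singleton]
    by_cases m : (key x, val x) ∈ PySem.Set.ofList (t.map (fun r => (key r, val r)))
    · rw [pvAdd_of_mem _ _ m]
      by_cases hA : key x = i
      · have hb : val x ∈ PySem.Set.ofList ((t.filter (fun r => key r == i)).map val) := by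
          rw [PySem.Set.mem_ofList] at m ⊢
          simp only [List.mem_map, List.mem_filter] at m ⊢
          obtain ⟨r, hr, hre⟩ := m
          exact ⟨r, ⟨hr, by simp [(Prod.mk.injEq .. ▸ hre).1, hA]⟩, (Prod.mk.injEq .. ▸ hre).2⟩
        simp only [hA, List.filter_cons, List.filter_nil, BEq.rfl, if_true,
          List.map_append, List.map_cons, List.map_nil, pvOfList_append_singleton,
          pvAdd_of_mem _ _ hb]
        exact ih
      · simp [hA, ih]
    · rw [pvAdd_of_not_mem _ _ m, List.filter_append, List.length_append]
      simp only [List.filter_cons, List.filter_nil]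
      by_cases hA : key x = i
      · have hb : ¬ val x ∈ PySem.Set.ofList ((t.filter (fun r => key r == i)).map val) := by
          rw [PySem.Set.mem_ofList]
          intro hc
          apply m
          rw [PySem.Set.mem_ofList]
          simp only [List.mem_map, List.mem_filter] at hc ⊢
          obtain ⟨r, ⟨hr, hki⟩, hv⟩ := hc
          exact ⟨r, hr, by simp at hki; rw [hki, hA, hv]⟩
        simp only [hA, List.filter_cons, BEq.rfl, if_true, List.map_append, List.map_cons,
          List.map_nil, pvOfList_append_singleton, pvAdd_of_not_mem _ _ hb,
          List.countP_append, ih]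
        by_cases hq : q (val x) <;> simp [hq]
      · have : (key x == i) = false := by simp [hA]
        simp [this, ih]

lemma pvMem_banned (xs : List String) (k : Int) (v : String) :
    (v ∈ PySem.Set.ofList
      ((((xs.foldl (fun d x => d.insert x (d.getD x 0 + 1))
          (PySem.Dict.empty : PySem.Dict String Int)).items.filter (fun p => p.2 ≥ k)).map (·.1))))
    ↔ (v ∈ xs ∧ k ≤ ((xs.count v : Int))) := by
  set d := xs.foldl (fun d x => d.insert x (d.getD x 0 + 1)) (PySem.Dict.empty : PySem.Dict String Int) with hd
  have hkeys : d.keys = PySem.Set.ofList xs := by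
    rw [hd, PySem.Dict.keys_foldl_insert]
    show PySem.Set.update [] xs = _
    rw [PySem.Set.ofList_eq_foldl]; rfl
  have hnd : d.keys.Nodup := by
    rw [hkeys]; exact PySem.Set.nodup_ofList xs
  have hitems : d.items = d.keys.map (fun u => (u, d.getD u 0)) :=
    PySem.Dict.items_eq_map_keys d hnd 0
  have hget : ∀ u, d.getD u 0 = (xs.count u : Int) := by
    intro u
    rw [hd, PySem.Dict.getD_foldl_insert_add_one]
    show (0 : Int) + _ = _
    ring
  rw [PySem.Set.mem_ofList, hitems, hkeys]
  simp only [List.mem_map, List.mem_filter, PySem.Set.mem_ofList]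
  constructor
  · rintro ⟨p, ⟨⟨u, hu, rfl⟩, hpk⟩, rfl⟩
    exact ⟨hu, by simpa [hget] using hpk⟩
  · rintro ⟨hv, hk⟩
    exact ⟨(v, d.getD v 0), ⟨⟨v, hv, rfl⟩, by simpa [hget] using hk⟩, rfl⟩

lemma pvFoldl_count (p : String → Prop) [DecidablePred p] (l : List String) :
    l.foldl (fun n u => if p u then n + 1 else n) (0 : Int) = (l.countP (fun u => decide (p u)) : Int) := by
  have h := PySem.List.foldl_count_if (fun u => decide (p u)) l 0
  simpa using h

-- A's answer for every id: size of the deduped reported-id set of i's entries, filtered by the count test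
lemma pvA_eq (ids report : List String) (k : Int)
    (hpre : ∀ r ∈ report, (PySem.Str.split₀ r).length = 2) :
    solution ids report k
    = ids.map (fun i =>
        (((PySem.Set.ofList (((PySem.Set.ofList report).filter (fun r => pvU r == i)).map pvR)).countP
          (fun u => decide (k ≤ ((((PySem.Set.ofList report).map pvR).count u : Int))))) : Int)) := by
  have hpre' : ∀ r ∈ PySem.Set.ofList report, (PySem.Str.split₀ r).length = 2 :=
    fun r hr => hpre r ((PySem.Set.mem_ofList report r).1 hr)
  simp only [solution]
  rw [PySem.List.foldl_congr_mem _ pvStepA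
      (fun st r =>
        (st.1.insert (pvU r) (PySem.Set.add (st.1.getD (pvU r) PySem.Set.empty) (pvR r)),
         st.2.insert (pvR r) (st.2.getD (pvR r) 0 + 1)))
      _ (fun st r hr => pvStepA_eq st r (hpre' r hr))]
  rw [PySem.List.foldl_prod_mk
        (fun (d : PySem.Dict String (PySem.Set String)) r =>
          d.insert (pvU r) (PySem.Set.add (d.getD (pvU r) PySem.Set.empty) (pvR r)))
        (fun (d : PySem.Dict String Int) r => d.insert (pvR r) (d.getD (pvR r) 0 + 1))
        (PySem.Set.ofList report) PySem.Dict.empty PySem.Dict.empty,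
      PySem.List.foldl_append_singleton_eq_map]
  simp only [List.nil_append]
  apply List.map_congr_left
  intro i _
  rw [pvGetD_foldl_set pvU pvR _ _ i]
  have hde : (PySem.Dict.empty : PySem.Dict String (PySem.Set String)).getD i PySem.Set.empty
      = PySem.Set.empty := rfl
  rw [hde, ← List.foldl_map (f := pvR) (g := PySem.Set.add), pvOfList_eq, pvFoldl_count]
  congr 1
  refine List.countP_congr ?_
  intro u _
  rw [← List.foldl_map (f := pvR) (g := fun (d : PySem.Dict String Int) x => d.insert x (d.getD x 0 + 1)),
      PySem.Dict.getD_foldl_insert_add_one]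
  simp [ge_iff_le]

-- B's answer for every id: the same quantity, read off the pair tally
lemma pvB_eq (ids report : List String) (k : Int)
    (hpre : ∀ r ∈ report, (PySem.Str.split₀ r).length = 2) :
    solution_alt ids report k
    = ids.map (fun i =>
        (((PySem.Set.ofList (((PySem.Set.ofList report).filter (fun r => pvU r == i)).map pvR)).countP
          (fun u => decide (k ≤ ((((PySem.Set.ofList report).map pvR).count u : Int))))) : Int)) := by
  have hpre' : ∀ r ∈ PySem.Set.ofList report, (PySem.Str.split₀ r).length = 2 :=
    fun r hr => hpre r ((PySem.Set.mem_ofList report r).1 hr)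
  simp only [solution_alt]
  rw [PySem.List.foldl_congr_mem _ pvStepB
      (fun st r =>
        (st.1.insert (pvR r) (st.1.getD (pvR r) 0 + 1), PySem.Set.add st.2 (pvU r, pvR r)))
      _ (fun st r hr => pvStepB_eq st r (hpre' r hr))]
  rw [PySem.List.foldl_prod_mk
        (fun (d : PySem.Dict String Int) r => d.insert (pvR r) (d.getD (pvR r) 0 + 1))
        (fun (s : PySem.Set (String × String)) r => PySem.Set.add s (pvU r, pvR r))
        (PySem.Set.ofList report) PySem.Dict.empty PySem.Set.empty]
  rw [← List.foldl_map (f := pvR) (g := fun (d : PySem.Dict String Int) x => d.insert x (d.getD x 0 + 1))]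
  rw [← List.foldl_map (f := fun r => (pvU r, pvR r)) (g := PySem.Set.add), pvOfList_eq]
  simp only []
  apply List.map_congr_left
  intro i _
  rw [pvGetD_foldl_tally _ Prod.fst _ _ i]
  have hde : (PySem.Dict.empty : PySem.Dict String Int).getD i 0 = 0 := rfl
  rw [hde, zero_add]
  rw [List.filter_congr (q := fun p => decide (k ≤ ((((PySem.Set.ofList report).map pvR).count p.2 : Int))) && p.1 == i)
      (fun p hp => by
        have hmem : p.2 ∈ (PySem.Set.ofList report).map pvR := by
          rw [PySem.Set.mem_ofList] at hp
          obtain ⟨r, hr, rfl⟩ := List.mem_map.1 hp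
          exact List.mem_map.2 ⟨r, hr, rfl⟩
        congr 1
        by_cases hk : k ≤ ((((PySem.Set.ofList report).map pvR).count p.2 : Int))
        · simp only [hk, decide_true]
          exact (PySem.Set.contains_iff _ _).2 ((pvMem_banned _ k p.2).2 ⟨hmem, hk⟩)
        · simp only [hk, decide_false]
          rw [← Bool.not_eq_true]
          intro hc
          exact hk ((pvMem_banned _ k p.2).1 ((PySem.Set.contains_iff _ _).1 hc)).2)]
  exact_mod_cast pvCore pvU pvR
    (fun v => decide (k ≤ ((((PySem.Set.ofList report).map pvR).count v : Int)))) i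
    (PySem.Set.ofList report)

-- ===== VERDICT (by name: the statement is the Claim_ definition above) =====
theorem solution_spec : Claim_equal_solution := by
  intro ids report k _ hpre
  unfold Spec_solution
  rw [pvA_eq ids report k hpre, pvB_eq ids report k hpre]
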